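-- pv_equiv track=rewrite | github.com/anonymousconfcode/VPGAE | data/workload_class.py | init_subsets
-- ===== SOURCE A (Python) =====
-- import copy
--
-- def init_subsets(attribute_num, referenced_attributes):
--     partitions = [[i+1 for i in range(attribute_num)]]
--     for query_attr in referenced_attributes:
--         temp_partitions = copy.deepcopy(partitions)
--         for partition in temp_partitions:
--             accessed_attrs = []
--             ignored_attrs = []
--
--             for attr in query_attr:
--                 if attr in partition:
--                     accessed_attrs.append(attr)
--             for attr in partition:
--                 if attr not in accessed_attrs:
--                     ignored_attrs.append(attr)
--
--             partitions.remove(partition)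
--             if len(accessed_attrs) > 0:
--                 partitions.append(accessed_attrs)
--             if len(ignored_attrs) > 0:
--                 partitions.append(ignored_attrs)
--     return partitions
-- ===== SOURCE B (Python) =====
-- def init_subsets(attribute_num, referenced_attributes):
--     partitions = [list(range(1, attribute_num + 1))]
--     for query_attr in referenced_attributes:
--         new_partitions = []
--         for partition in partitions:
--             pset = set(partition)
--             accessed = [a for a in query_attr if a in pset]
--             aset = set(accessed)
--             ignored = [a for a in partition if a not in aset]
--             if accessed:
--                 new_partitions.append(accessed)
--             if ignored:
--                 new_partitions.append(ignored)
--         partitions = new_partitions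
--     return partitions
-- ===== Notes on version B (the rewrite author's own statement) =====
-- stated objective: faster
-- what changed: Rebuilds the partition list fresh each query instead of deepcopy + list.remove + append on a mutated list, and uses sets for the membership tests instead of inner list scans.
import Mathlib
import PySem

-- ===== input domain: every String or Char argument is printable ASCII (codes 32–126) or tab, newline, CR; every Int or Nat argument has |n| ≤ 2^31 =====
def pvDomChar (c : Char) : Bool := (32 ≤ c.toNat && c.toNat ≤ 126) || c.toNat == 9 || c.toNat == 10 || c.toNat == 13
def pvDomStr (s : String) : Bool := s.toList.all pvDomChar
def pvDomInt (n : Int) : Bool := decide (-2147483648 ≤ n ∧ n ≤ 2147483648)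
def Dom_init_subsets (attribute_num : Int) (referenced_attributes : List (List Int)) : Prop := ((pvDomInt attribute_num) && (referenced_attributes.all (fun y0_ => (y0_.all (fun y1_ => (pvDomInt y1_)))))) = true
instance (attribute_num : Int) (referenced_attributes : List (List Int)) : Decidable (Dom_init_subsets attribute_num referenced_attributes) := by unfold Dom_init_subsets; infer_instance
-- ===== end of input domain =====

-- B rebuilds the partition list fresh for each query (no deepcopy, no list.remove) and
-- tests membership through sets; the return values are proved equal.

-- ===== PORT A =====
-- body of A's inner `for partition in temp_partitions:` loop, named so the proofs can refer to it
def init_subsets_loop (query_attr : List Int) (partitions : List (List Int)) (partition : List Int) : List (List Int) :=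
  let accessed_attrs := query_attr.foldl (fun acc attr => if attr ∈ partition then acc ++ [attr] else acc) []
  let ignored_attrs := partition.foldl (fun acc attr => if attr ∉ accessed_attrs then acc ++ [attr] else acc) []
  -- partition is always present in partitions, so remove? never returns none; getD keeps the port total
  let partitions := (PySem.List.remove? partitions partition).getD partitions
  let partitions := if accessed_attrs.length > 0 then partitions ++ [accessed_attrs] else partitions
  if ignored_attrs.length > 0 then partitions ++ [ignored_attrs] else partitions

def init_subsets (attribute_num : Int) (referenced_attributes : List (List Int)) : List (List Int) :=
  let partitions : List (List Int) := [(PySem.List.pyRange 0 attribute_num 1).map (fun i => i + 1)]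
  referenced_attributes.foldl (fun partitions query_attr =>
    let temp_partitions := partitions   -- copy.deepcopy(partitions): lists are values here
    temp_partitions.foldl (init_subsets_loop query_attr) partitions)
    partitions

-- ===== PORT B =====
-- body of B's inner `for partition in partitions:` loop
def init_subsets_alt_loop (query_attr : List Int) (new_partitions : List (List Int)) (partition : List Int) : List (List Int) :=
  let pset := PySem.Set.ofList partition
  let accessed := query_attr.filter (fun a => PySem.Set.contains pset a)
  let aset := PySem.Set.ofList accessed
  let ignored := partition.filter (fun a => !PySem.Set.contains aset a)
  let np := if accessed ≠ [] then new_partitions ++ [accessed] else new_partitions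
  if ignored ≠ [] then np ++ [ignored] else np

def init_subsets_alt (attribute_num : Int) (referenced_attributes : List (List Int)) : List (List Int) :=
  let partitions : List (List Int) := [PySem.List.pyRange 1 (attribute_num + 1) 1]
  referenced_attributes.foldl (fun partitions query_attr =>
    partitions.foldl (init_subsets_alt_loop query_attr) [])
    partitions

-- ===== PRECONDITION & SPEC =====
def Spec_init_subsets (attribute_num : Int) (referenced_attributes : List (List Int)) (out : List (List Int)) : Prop := out = init_subsets_alt attribute_num referenced_attributes
instance (attribute_num : Int) (referenced_attributes : List (List Int)) (out : List (List Int)) : Decidable (Spec_init_subsets attribute_num referenced_attributes out) := by unfold Spec_init_subsets; infer_instance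

-- ===== CLAIM (what is proved, stated in full; the proofs are below) =====
def Claim_equal_init_subsets : Prop := ∀ (attribute_num : Int) (referenced_attributes : List (List Int)), Dom_init_subsets attribute_num referenced_attributes → Spec_init_subsets attribute_num referenced_attributes (init_subsets attribute_num referenced_attributes)

-- ===== LEMMAS AND PROOFS =====

-- the (at most two) pieces one query splits one partition into
def pvSplits (q p : List Int) : List (List Int) :=
  let accessed := q.filter (fun a => decide (a ∈ p))
  let ignored := p.filter (fun a => !decide (a ∈ accessed))
  (if accessed = [] then [] else [accessed]) ++ (if ignored = [] then [] else [ignored])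

theorem pv_accessed_eq (q p : List Int) :
    q.foldl (fun acc attr => if attr ∈ p then acc ++ [attr] else acc) [] =
      q.filter (fun a => decide (a ∈ p)) := by
  simpa using PySem.List.foldl_append_ite_eq_filter (fun a => a ∈ p) q []

theorem pv_accessed_eq_alt (q p : List Int) :
    q.filter (fun a => PySem.Set.contains (PySem.Set.ofList p) a) =
      q.filter (fun a => decide (a ∈ p)) := by
  apply List.filter_congr
  intro a _
  simp [PySem.Set.contains_eq_listContains, PySem.Set.mem_ofList]

theorem pv_ignored_eq (q p : List Int) :
    p.foldl (fun acc attr => if attr ∉ (q.filter (fun a => decide (a ∈ p))) then acc ++ [attr] else acc) [] =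
      p.filter (fun a => !decide (a ∈ q.filter (fun a => decide (a ∈ p)))) := by
  simpa using PySem.List.foldl_append_ite_eq_filter
    (fun a => a ∉ (q.filter (fun a => decide (a ∈ p)))) p []

theorem pv_ignored_eq_alt (q p : List Int) :
    p.filter (fun a => !PySem.Set.contains (PySem.Set.ofList (q.filter (fun a => decide (a ∈ p)))) a) =
      p.filter (fun a => !decide (a ∈ q.filter (fun a => decide (a ∈ p)))) := by
  apply List.filter_congr
  intro a _
  simp [PySem.Set.contains_eq_listContains, PySem.Set.mem_ofList]

-- A's loop body when its partition sits at the head of the current state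
theorem pv_stepA (q p : List Int) (rest : List (List Int)) :
    init_subsets_loop q (p :: rest) p = rest ++ pvSplits q p := by
  unfold init_subsets_loop
  simp only [pv_accessed_eq, pv_ignored_eq, PySem.List.remove?_cons_self, Option.getD_some,
    pvSplits, gt_iff_lt, List.length_pos_iff]
  split_ifs with h1 h2 <;> simp_all [List.append_assoc]

-- B's loop body
theorem pv_stepB (q p : List Int) (acc : List (List Int)) :
    init_subsets_alt_loop q acc p = acc ++ pvSplits q p := by
  unfold init_subsets_alt_loop
  simp only [pv_accessed_eq_alt, pv_ignored_eq_alt, pvSplits]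
  split_ifs with h1 h2 <;> simp_all [List.append_assoc]

-- the inner loop over one query: A's remove-and-append fold equals B's rebuild fold
theorem pv_inner (q : List Int) (P acc : List (List Int)) :
    P.foldl (init_subsets_loop q) (P ++ acc) = P.foldl (init_subsets_alt_loop q) acc := by
  induction P generalizing acc with
  | nil => rfl
  | cons p P ih =>
    simp only [List.foldl_cons, List.cons_append]
    rw [pv_stepA q p (P ++ acc), pv_stepB q p acc, List.append_assoc]
    exact ih (acc ++ pvSplits q p)

theorem pv_init_eq (n : Int) :
    (PySem.List.pyRange 0 n 1).map (fun i => i + 1) = PySem.List.pyRange 1 (n + 1) 1 := by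
  simp only [PySem.List.pyRange_one]
  have : (n - 0).toNat = (n + 1 - 1).toNat := by omega
  rw [this, List.map_map]
  apply List.map_congr_left
  intro k _
  simp; ring

theorem pv_outer (qs : List (List Int)) (P : List (List Int)) :
    qs.foldl (fun partitions query_attr =>
        partitions.foldl (init_subsets_loop query_attr) partitions) P =
      qs.foldl (fun partitions query_attr =>
        partitions.foldl (init_subsets_alt_loop query_attr) []) P := by
  induction qs generalizing P with
  | nil => rfl
  | cons q qs ih =>
    simp only [List.foldl_cons]
    rw [show P.foldl (init_subsets_loop q) P = P.foldl (init_subsets_loop q) (P ++ []) by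
          rw [List.append_nil],
        pv_inner]
    exact ih _

-- ===== VERDICT (by name: the statement is the Claim_ definition above) =====
theorem init_subsets_spec : Claim_equal_init_subsets := by
  intro n qs _
  show init_subsets n qs = init_subsets_alt n qs
  unfold init_subsets init_subsets_alt
  rw [pv_init_eq]
  exact pv_outer qs _
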